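-- pv_equiv track=rewrite | github.com/YoujinROH/Coding_Test | programmers/basic/day4_operation_and_conditional_statement.py | problem_3
-- ===== SOURCE A (Python) =====
-- def problem_3(n):
--     answer = 0
--     if n%2==1:
--         for i in range((n//2)+1):
--             answer+=n-(2*i)
--     else:
--         for i in range((n//2)+1):
--             answer+=(n-(2*i))**2
--     return answer
-- ===== SOURCE B (Python) =====
-- def problem_3(n):
--     # Closed-form arithmetic instead of a loop; O(1).
--     if n < 0:
--         return 0
--     if n % 2 == 1:
--         k = (n + 1) // 2
--         return k * k
--     m = n // 2
--     return 2 * m * (m + 1) * (2 * m + 1) // 3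
-- ===== Notes on version B (the rewrite author's own statement) =====
-- stated objective: faster
-- what changed: Replaced the linear-time summation loop with constant-time closed-form formulas: the odd branch's descending-odd sum equals a perfect square of the term count, and the even branch's sum of squares uses the standard square-pyramidal formula (an empty loop, hence zero, for negative n).
import Mathlib
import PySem

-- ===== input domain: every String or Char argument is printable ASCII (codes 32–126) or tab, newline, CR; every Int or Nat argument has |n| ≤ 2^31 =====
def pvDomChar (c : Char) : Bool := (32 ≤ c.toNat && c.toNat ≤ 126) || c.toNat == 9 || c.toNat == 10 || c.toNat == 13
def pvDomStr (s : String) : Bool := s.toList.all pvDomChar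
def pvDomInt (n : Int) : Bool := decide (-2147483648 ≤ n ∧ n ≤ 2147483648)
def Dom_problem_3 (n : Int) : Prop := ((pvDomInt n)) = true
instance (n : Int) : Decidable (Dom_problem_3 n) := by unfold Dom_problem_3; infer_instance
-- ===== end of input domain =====

-- B replaces A's O(n) summation loop with O(1) closed-form formulas for each parity branch.

-- ===== PORT A =====
def problem_3 (n : Int) : Int :=
  if PySem.Int.mod n 2 == 1 then
    (PySem.List.pyRange 0 (PySem.Int.floordiv n 2 + 1) 1).foldl
      (fun answer i => answer + (n - 2 * i)) 0
  else
    (PySem.List.pyRange 0 (PySem.Int.floordiv n 2 + 1) 1).foldl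
      (fun answer i => answer + (n - 2 * i) ^ 2) 0

-- ===== PORT B =====
def problem_3_alt (n : Int) : Int :=
  if n < 0 then 0
  else if PySem.Int.mod n 2 == 1 then
    let k := PySem.Int.floordiv (n + 1) 2
    k * k
  else
    let m := PySem.Int.floordiv n 2
    PySem.Int.floordiv (2 * m * (m + 1) * (2 * m + 1)) 3

-- ===== PRECONDITION & SPEC =====
def Spec_problem_3 (n : Int) (out : Int) : Prop := out = problem_3_alt n
instance (n : Int) (out : Int) : Decidable (Spec_problem_3 n out) := by unfold Spec_problem_3; infer_instance

-- ===== CLAIM (what is proved, stated in full; the proofs are below) =====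
def Claim_equal_problem_3 : Prop := ∀ (n : Int), Dom_problem_3 n → Spec_problem_3 n (problem_3 n)

-- ===== LEMMAS AND PROOFS =====

-- sum_{i=0}^{m} (c - 2*i) = (m+1)*c - m*(m+1)
theorem pv_sum_lin (m : Nat) (c : Int) :
    (PySem.List.pyRange 0 ((m : Int) + 1) 1).foldl (fun answer i => answer + (c - 2 * i)) 0
      = ((m : Int) + 1) * c - (m : Int) * ((m : Int) + 1) := by
  induction m with
  | zero =>
      rw [show ((0 : Nat) : Int) + 1 = 0 + 1 by norm_num, PySem.List.pyRange_one_singleton]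
      simp
  | succ k ih =>
      rw [show ((k + 1 : Nat) : Int) + 1 = ((k : Int) + 1) + 1 by push_cast; ring,
        PySem.List.pyRange_one_succ_right (by positivity)]
      rw [List.foldl_append]
      simp only [List.foldl_cons, List.foldl_nil, ih]
      push_cast; ring

-- sum_{i=0}^{m} (c - 2*i)^2 = (m+1)*c^2 - 2*c*m*(m+1) + (4*m^3 + 6*m^2 + 2*m)/... stated times 3
theorem pv_sum_sq (m : Nat) (c : Int) :
    3 * ((PySem.List.pyRange 0 ((m : Int) + 1) 1).foldl (fun answer i => answer + (c - 2 * i) ^ 2) 0)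
      = 3 * ((m : Int) + 1) * c ^ 2 - 6 * c * (m : Int) * ((m : Int) + 1)
        + 2 * (m : Int) * ((m : Int) + 1) * (2 * (m : Int) + 1) := by
  induction m with
  | zero =>
      rw [show ((0 : Nat) : Int) + 1 = 0 + 1 by norm_num, PySem.List.pyRange_one_singleton]
      simp
  | succ k ih =>
      rw [show ((k + 1 : Nat) : Int) + 1 = ((k : Int) + 1) + 1 by push_cast; ring,
        PySem.List.pyRange_one_succ_right (by positivity)]
      rw [List.foldl_append]
      simp only [List.foldl_cons, List.foldl_nil]
      push_cast
      push_cast at ih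
      nlinarith [ih]

-- ===== VERDICT (by name: the statement is the Claim_ definition above) =====
theorem problem_3_spec : Claim_equal_problem_3 := by
  intro n _
  unfold Spec_problem_3 problem_3 problem_3_alt
  rw [PySem.Int.mod_eq_emod_of_pos (by norm_num),
    PySem.Int.floordiv_eq_ediv_of_pos (a := n) (by norm_num)]
  by_cases hneg : n < 0
  · -- loop range is empty; both sides are 0
    have hb : n / 2 + 1 ≤ 0 := by omega
    rw [PySem.List.pyRange_one_eq_nil hb]
    simp [hneg]
  · simp only [if_neg hneg]
    rcases Int.even_or_odd n with ⟨k, hk⟩ | ⟨k, hk⟩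
    · -- n = 2k, k ≥ 0
      have hk0 : 0 ≤ k := by omega
      obtain ⟨m, rfl⟩ := Int.eq_ofNat_of_zero_le hk0
      have hmod : n % 2 = 0 := by omega
      have hdiv : n / 2 = (m : Int) := by omega
      simp only [hmod, hdiv]
      rw [show ((0 : Int) == 1) = false by decide]
      simp only [Bool.false_eq_true, if_false, Bool.false_eq_true]
      have h3 := pv_sum_sq m n
      have hn : n = 2 * (m : Int) := by omega
      rw [PySem.Int.floordiv_eq_ediv_of_pos (by norm_num : (0:Int) < 3)]
      have : 2 * (m : Int) * ((m : Int) + 1) * (2 * (m : Int) + 1)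
          = 3 * ((PySem.List.pyRange 0 ((m : Int) + 1) 1).foldl
              (fun answer i => answer + (n - 2 * i) ^ 2) 0) := by
        rw [h3]; subst hn; ring
      rw [this, Int.mul_ediv_cancel_left _ (by norm_num)]
    · -- n = 2k + 1, k ≥ 0
      have hk0 : 0 ≤ k := by omega
      obtain ⟨m, rfl⟩ := Int.eq_ofNat_of_zero_le hk0
      have hmod : n % 2 = 1 := by omega
      have hdiv : n / 2 = (m : Int) := by omega
      simp only [hmod, hdiv]
      rw [show ((1 : Int) == 1) = true by decide]
      simp only [if_true]
      rw [PySem.Int.floordiv_eq_ediv_of_pos (by norm_num : (0:Int) < 2)]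
      have hdiv2 : (n + 1) / 2 = (m : Int) + 1 := by omega
      rw [hdiv2, pv_sum_lin m n]
      have : n = 2 * (m : Int) + 1 := by omega
      rw [this]; ring
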